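-- pv_equiv track=rewrite | github.com/zwallace425/SARS-CoV-2_Pipeline | scripts/variant_dynamics.py | aa_prevalence_extra
-- ===== SOURCE A (Python) =====
-- def aa_prevalence_extra(cov_prevalence):
--
-- 	aa_prevalence = {}
--
-- 	for cov in cov_prevalence.keys():
-- 		aa_muts = cov.split(",")
-- 		for region in cov_prevalence[cov].keys():
-- 			for date in cov_prevalence[cov][region].keys():
-- 				for mut in aa_muts:
-- 					if aa_prevalence.get(mut):
-- 						if aa_prevalence[mut].get(region):
-- 							if aa_prevalence[mut][region].get(date):
-- 								aa_prevalence[mut][region][date] += cov_prevalence[cov][region][date]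
-- 							else:
-- 								aa_prevalence[mut][region][date] = cov_prevalence[cov][region][date]
-- 						else:
-- 							aa_prevalence[mut][region] = {}
-- 							aa_prevalence[mut][region][date] = cov_prevalence[cov][region][date]
-- 					else:
-- 						aa_prevalence[mut] = {}
-- 						aa_prevalence[mut][region] = {}
-- 						aa_prevalence[mut][region][date] = cov_prevalence[cov][region][date]
--
-- 	return aa_prevalence
-- ===== SOURCE B (Python) =====
-- def _merge_dates(left, right):
-- 	out = dict(left)
-- 	for date, val in right.items():
-- 		out[date] = out[date] + val if date in out else val
-- 	return out
--
-- def _merge_regions(left, right):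
-- 	out = dict(left)
-- 	for region, dates in right.items():
-- 		out[region] = _merge_dates(out[region], dates) if region in out else dates
-- 	return out
--
-- def aa_prevalence_extra(cov_prevalence):
-- 	# map-reduce: flatten to one singleton nested dict per (cov, region, date, mut)
-- 	# contribution, then fold the contributions together with level-wise deep merges.
-- 	contribs = [{mut: {region: {date: val}}}
-- 	            for cov, regions in cov_prevalence.items()
-- 	            for region, dates in regions.items()
-- 	            for date, val in dates.items()
-- 	            for mut in cov.split(",")]
-- 	result = {}
-- 	for c in contribs:
-- 		for mut, regions in c.items():
-- 			result[mut] = _merge_regions(result[mut], regions) if mut in result else regions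
-- 	return result
-- ===== Notes on version B (the rewrite author's own statement) =====
-- stated objective: alternative
-- what changed: Replaced A's single interleaved quadruple loop that accumulates in place through a truthiness-guarded branch cascade by a map-reduce decomposition: flatten the input into one singleton nested dict per (cov, region, date, mut) contribution via a comprehension, then reduce the list with level-wise deep-merge helpers (dates merge by addition, regions and mutations by recursive merge).
import Mathlib
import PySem

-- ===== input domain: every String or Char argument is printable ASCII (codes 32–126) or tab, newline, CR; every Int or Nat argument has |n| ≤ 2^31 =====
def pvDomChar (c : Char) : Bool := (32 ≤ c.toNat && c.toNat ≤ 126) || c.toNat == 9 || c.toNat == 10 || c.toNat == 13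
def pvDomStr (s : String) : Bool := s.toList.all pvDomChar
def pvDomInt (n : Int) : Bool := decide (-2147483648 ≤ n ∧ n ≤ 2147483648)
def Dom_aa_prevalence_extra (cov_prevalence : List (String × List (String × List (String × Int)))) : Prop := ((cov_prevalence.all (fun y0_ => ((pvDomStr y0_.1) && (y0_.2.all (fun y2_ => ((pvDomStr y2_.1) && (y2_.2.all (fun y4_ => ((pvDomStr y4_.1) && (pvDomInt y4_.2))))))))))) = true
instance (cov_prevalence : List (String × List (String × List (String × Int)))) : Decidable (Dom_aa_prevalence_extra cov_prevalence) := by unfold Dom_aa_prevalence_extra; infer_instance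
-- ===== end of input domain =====

-- B replaces A's in-place nested branch-cascade accumulation by a map-reduce decomposition:
-- flatten the input to one singleton nested dict per (cov,region,date,mut) contribution,
-- then fold them together with a recursive-by-level deep merge (objective: alternative).


abbrev PvNDict := PySem.Dict String (PySem.Dict String (PySem.Dict String Int))

-- ===== PORT A =====
-- Literal port of A: one pass over cov × region × date × mut, updating the nested dict in place
-- through Python's truthiness-guarded branch cascade ('if aa_prevalence.get(mut):' is truthy iff
-- the value exists AND is non-empty / non-zero); in-place mutation of the inner dicts is modeled
-- by re-inserting them (PySem.Dict.insert overwrites keeping position, like Python assignment).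
def aa_prevalence_extra (cov_prevalence : List (String × List (String × List (String × Int)))) : List (String × List (String × List (String × Int))) :=
  let aa : PvNDict :=
    cov_prevalence.foldl (fun aa cov_entry =>
      -- aa_muts = cov.split(",")  (separator "," is non-empty, so split? is always `some`)
      let aa_muts : List String := (PySem.Str.split? cov_entry.1 ",").getD []
      cov_entry.2.foldl (fun aa region_entry =>
        region_entry.2.foldl (fun aa date_entry =>
          aa_muts.foldl (fun aa mu =>
            let v := date_entry.2
            match aa.get? mu with
            | some dm =>
              if dm.size ≠ 0 then
                match dm.get? region_entry.1 with
                | some dr =>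
                  if dr.size ≠ 0 then
                    match dr.get? date_entry.1 with
                    | some w =>
                      if w ≠ 0 then
                        aa.insert mu (dm.insert region_entry.1 (dr.insert date_entry.1 (w + v)))
                      else
                        aa.insert mu (dm.insert region_entry.1 (dr.insert date_entry.1 v))
                    | none => aa.insert mu (dm.insert region_entry.1 (dr.insert date_entry.1 v))
                  else aa.insert mu (dm.insert region_entry.1 ((PySem.Dict.empty).insert date_entry.1 v))
                | none => aa.insert mu (dm.insert region_entry.1 ((PySem.Dict.empty).insert date_entry.1 v))
              else aa.insert mu ((PySem.Dict.empty).insert region_entry.1 ((PySem.Dict.empty).insert date_entry.1 v))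
            | none => aa.insert mu ((PySem.Dict.empty).insert region_entry.1 ((PySem.Dict.empty).insert date_entry.1 v))
          ) aa) aa) aa) PySem.Dict.empty
  aa.items.map (fun p => (p.1, p.2.items.map (fun q => (q.1, q.2.items))))

-- ===== PORT B =====
-- Port of B (Source B): two level-wise deep-merge helpers ('out = dict(left)' + overwrite-or-keep
-- iteration over right.items(), modeled by folding insert over the right dict's items), then the
-- flattening comprehension (nested flatMap/map) and the reduce loop folding the merges together.
def pvMergeDates (left right : PySem.Dict String Int) : PySem.Dict String Int :=
  right.items.foldl (fun out e =>
    out.insert e.1 (if out.contains e.1 then out.getD e.1 0 + e.2 else e.2)) left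

def pvMergeRegions (left right : PySem.Dict String (PySem.Dict String Int)) : PySem.Dict String (PySem.Dict String Int) :=
  right.items.foldl (fun out e =>
    out.insert e.1 (if out.contains e.1 then pvMergeDates (out.getD e.1 PySem.Dict.empty) e.2 else e.2)) left

def aa_prevalence_extra_alt (cov_prevalence : List (String × List (String × List (String × Int)))) : List (String × List (String × List (String × Int))) :=
  let contribs : List PvNDict :=
    cov_prevalence.flatMap (fun cov_entry =>
      cov_entry.2.flatMap (fun region_entry =>
        region_entry.2.flatMap (fun date_entry =>
          ((PySem.Str.split? cov_entry.1 ",").getD []).map (fun mu =>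
            PySem.Dict.mk [(mu, PySem.Dict.mk [(region_entry.1, PySem.Dict.mk [(date_entry.1, date_entry.2)])])]))))
  let result : PvNDict := contribs.foldl (fun r c =>
      c.items.foldl (fun out e =>
        out.insert e.1 (if out.contains e.1 then pvMergeRegions (out.getD e.1 PySem.Dict.empty) e.2 else e.2)) r) PySem.Dict.empty
  result.items.map (fun p => (p.1, p.2.items.map (fun q => (q.1, q.2.items))))

-- ===== PRECONDITION & SPEC =====
def Spec_aa_prevalence_extra (cov_prevalence : List (String × List (String × List (String × Int)))) (out : List (String × List (String × List (String × Int)))) : Prop := out = aa_prevalence_extra_alt cov_prevalence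
instance (cov_prevalence : List (String × List (String × List (String × Int)))) (out : List (String × List (String × List (String × Int)))) : Decidable (Spec_aa_prevalence_extra cov_prevalence out) := by unfold Spec_aa_prevalence_extra; infer_instance

-- ===== CLAIM (what is proved, stated in full; the proofs are below) =====
def Claim_equal_aa_prevalence_extra : Prop := ∀ (cov_prevalence : List (String × List (String × List (String × Int)))), Dom_aa_prevalence_extra cov_prevalence → Spec_aa_prevalence_extra cov_prevalence (aa_prevalence_extra cov_prevalence)

-- ===== LEMMAS AND PROOFS =====

abbrev PvKey := String × String × String

-- "aa[m][r][d] = u" as one persistent update (what both ports' per-quadruple effects amount to)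
def pvSetTriple (aa : PvNDict) (k : PvKey) (u : Int) : PvNDict :=
  aa.insert k.1 ((aa.getD k.1 PySem.Dict.empty).insert k.2.1
    (((aa.getD k.1 PySem.Dict.empty).getD k.2.1 PySem.Dict.empty).insert k.2.2 u))

-- "aa.get(m, {}).get(r, {}).get(d, 0)"
def pvGet3 (aa : PvNDict) (k : PvKey) : Int :=
  ((aa.getD k.1 PySem.Dict.empty).getD k.2.1 PySem.Dict.empty).getD k.2.2 0

-- A's branch cascade is exactly a triple write of (current value + v)
theorem pvStepA_eq (aa : PvNDict) (mu region date : String) (v : Int) :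
    (match aa.get? mu with
      | some dm =>
        if dm.size ≠ 0 then
          match dm.get? region with
          | some dr =>
            if dr.size ≠ 0 then
              match dr.get? date with
              | some w =>
                if w ≠ 0 then aa.insert mu (dm.insert region (dr.insert date (w + v)))
                else aa.insert mu (dm.insert region (dr.insert date v))
              | none => aa.insert mu (dm.insert region (dr.insert date v))
            else aa.insert mu (dm.insert region ((PySem.Dict.empty).insert date v))
          | none => aa.insert mu (dm.insert region ((PySem.Dict.empty).insert date v))
        else aa.insert mu ((PySem.Dict.empty).insert region ((PySem.Dict.empty).insert date v))
      | none => aa.insert mu ((PySem.Dict.empty).insert region ((PySem.Dict.empty).insert date v)))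
      = pvSetTriple aa (mu, region, date) (pvGet3 aa (mu, region, date) + v) := by
  simp only [pvSetTriple, pvGet3]
  rcases hm : aa.get? mu with _ | dm
  · have hgd : aa.getD mu PySem.Dict.empty = PySem.Dict.empty := by
      rw [PySem.Dict.getD_eq_get?_getD, hm]; rfl
    simp only [hgd, PySem.Dict.getD_empty, zero_add]
  · have hgd : aa.getD mu PySem.Dict.empty = dm := by
      rw [PySem.Dict.getD_eq_get?_getD, hm]; rfl
    dsimp only
    by_cases hsz : dm.size ≠ 0
    · rw [if_pos hsz]
      rcases hr : dm.get? region with _ | dr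
      · have hgdr : dm.getD region PySem.Dict.empty = PySem.Dict.empty := by
          rw [PySem.Dict.getD_eq_get?_getD, hr]; rfl
        simp only [hgd, hgdr, PySem.Dict.getD_empty, zero_add]
      · have hgdr : dm.getD region PySem.Dict.empty = dr := by
          rw [PySem.Dict.getD_eq_get?_getD, hr]; rfl
        dsimp only
        by_cases hszr : dr.size ≠ 0
        · rw [if_pos hszr]
          rcases hd : dr.get? date with _ | w
          · have hgdd : dr.getD date 0 = 0 := by
              rw [PySem.Dict.getD_eq_get?_getD, hd]; rfl
            simp only [hgd, hgdr, hgdd, zero_add]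
          · have hgdd : dr.getD date 0 = w := by
              rw [PySem.Dict.getD_eq_get?_getD, hd]; rfl
            dsimp only
            by_cases hw : w ≠ 0
            · rw [if_pos hw, hgd, hgdr, hgdd]
            · rw [if_neg hw]
              have hw0 : w = 0 := not_ne_iff.mp hw
              subst hw0
              rw [hgd, hgdr, hgdd, zero_add]
        · rw [if_neg hszr]
          have hdr : dr = PySem.Dict.empty := by
            apply PySem.Dict.ext
            simpa [PySem.Dict.size, List.length_eq_zero_iff] using not_ne_iff.mp hszr
          subst hdr
          rw [hgd, hgdr, PySem.Dict.getD_empty, zero_add]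
    · rw [if_neg hsz]
      have hdm : dm = PySem.Dict.empty := by
        apply PySem.Dict.ext
        simpa [PySem.Dict.size, List.length_eq_zero_iff] using not_ne_iff.mp hsz
      subst hdm
      rw [hgd, PySem.Dict.getD_empty, PySem.Dict.getD_empty, zero_add]

-- a singleton dict literal is an insert into the empty dict
theorem pvSingleton_eq {ν : Type} (k : String) (v : ν) :
    PySem.Dict.mk [(k, v)] = (PySem.Dict.empty : PySem.Dict String ν).insert k v := by
  rfl

-- merging a singleton contribution into the accumulator is exactly one triple write
theorem pvStepB_eq (aa : PvNDict) (mu region date : String) (v : Int) :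
    ((PySem.Dict.mk [(mu, PySem.Dict.mk [(region, PySem.Dict.mk [(date, v)])])]).items).foldl
        (fun out e =>
          out.insert e.1 (if out.contains e.1 then pvMergeRegions (out.getD e.1 PySem.Dict.empty) e.2 else e.2)) aa
      = pvSetTriple aa (mu, region, date) (pvGet3 aa (mu, region, date) + v) := by
  show aa.insert mu (if aa.contains mu then
      pvMergeRegions (aa.getD mu PySem.Dict.empty) (PySem.Dict.mk [(region, PySem.Dict.mk [(date, v)])])
      else PySem.Dict.mk [(region, PySem.Dict.mk [(date, v)])]) = _
  by_cases hm : aa.contains mu = true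
  · rw [if_pos hm]
    show aa.insert mu ((aa.getD mu PySem.Dict.empty).insert region
        (if (aa.getD mu PySem.Dict.empty).contains region then
          pvMergeDates ((aa.getD mu PySem.Dict.empty).getD region PySem.Dict.empty) (PySem.Dict.mk [(date, v)])
        else PySem.Dict.mk [(date, v)])) = _
    by_cases hr : (aa.getD mu PySem.Dict.empty).contains region = true
    · rw [if_pos hr]
      show aa.insert mu ((aa.getD mu PySem.Dict.empty).insert region
          (((aa.getD mu PySem.Dict.empty).getD region PySem.Dict.empty).insert date
            (if ((aa.getD mu PySem.Dict.empty).getD region PySem.Dict.empty).contains date then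
              ((aa.getD mu PySem.Dict.empty).getD region PySem.Dict.empty).getD date 0 + v else v))) = _
      by_cases hd : ((aa.getD mu PySem.Dict.empty).getD region PySem.Dict.empty).contains date = true
      · rw [if_pos hd]
        rfl
      · rw [if_neg hd]
        have h0 : ((aa.getD mu PySem.Dict.empty).getD region PySem.Dict.empty).getD date 0 = 0 :=
          PySem.Dict.getD_of_not_contains _ _ (by simpa using hd)
        simp only [pvSetTriple, pvGet3]
        rw [h0, zero_add]
    · rw [if_neg hr]
      have h0 : (aa.getD mu PySem.Dict.empty).getD region PySem.Dict.empty = PySem.Dict.empty :=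
        PySem.Dict.getD_of_not_contains _ _ (by simpa using hr)
      simp only [pvSetTriple, pvGet3, pvSingleton_eq]
      rw [h0, PySem.Dict.getD_empty, zero_add]
  · rw [if_neg hm]
    have h0 : aa.getD mu PySem.Dict.empty = PySem.Dict.empty :=
      PySem.Dict.getD_of_not_contains _ _ (by simpa using hm)
    simp only [pvSetTriple, pvGet3, pvSingleton_eq]
    rw [h0, PySem.Dict.getD_empty, PySem.Dict.getD_empty, zero_add]

-- folding over a flatMap is the nested fold
theorem pvFoldlFlatMap {α β γ : Type} (l : List α) (f : α → List β) (g : γ → β → γ) :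
    ∀ i : γ, (l.flatMap f).foldl g i = l.foldl (fun s x => (f x).foldl g s) i := by
  induction l with
  | nil => intro i; rfl
  | cons x xs ih =>
    intro i
    rw [List.flatMap_cons, List.foldl_append, List.foldl_cons, ih]

-- the accumulated nested dicts of the two ports coincide
theorem pv_dict_eq (cov_prevalence : List (String × List (String × List (String × Int)))) :
    cov_prevalence.foldl (fun aa cov_entry =>
      cov_entry.2.foldl (fun aa region_entry =>
        region_entry.2.foldl (fun aa date_entry =>
          ((PySem.Str.split? cov_entry.1 ",").getD []).foldl (fun aa mu =>
            match aa.get? mu with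
            | some dm =>
              if dm.size ≠ 0 then
                match dm.get? region_entry.1 with
                | some dr =>
                  if dr.size ≠ 0 then
                    match dr.get? date_entry.1 with
                    | some w =>
                      if w ≠ 0 then
                        aa.insert mu (dm.insert region_entry.1 (dr.insert date_entry.1 (w + date_entry.2)))
                      else
                        aa.insert mu (dm.insert region_entry.1 (dr.insert date_entry.1 date_entry.2))
                    | none => aa.insert mu (dm.insert region_entry.1 (dr.insert date_entry.1 date_entry.2))
                  else aa.insert mu (dm.insert region_entry.1 ((PySem.Dict.empty).insert date_entry.1 date_entry.2))
                | none => aa.insert mu (dm.insert region_entry.1 ((PySem.Dict.empty).insert date_entry.1 date_entry.2))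
              else aa.insert mu ((PySem.Dict.empty).insert region_entry.1 ((PySem.Dict.empty).insert date_entry.1 date_entry.2))
            | none => aa.insert mu ((PySem.Dict.empty).insert region_entry.1 ((PySem.Dict.empty).insert date_entry.1 date_entry.2))
          ) aa) aa) aa) (PySem.Dict.empty : PvNDict)
      = ((cov_prevalence.flatMap (fun cov_entry =>
      cov_entry.2.flatMap (fun region_entry =>
        region_entry.2.flatMap (fun date_entry =>
          ((PySem.Str.split? cov_entry.1 ",").getD []).map (fun mu =>
            PySem.Dict.mk [(mu, PySem.Dict.mk [(region_entry.1, PySem.Dict.mk [(date_entry.1, date_entry.2)])])]))))).foldl (fun r c =>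
      c.items.foldl (fun out e =>
        out.insert e.1 (if out.contains e.1 then pvMergeRegions (out.getD e.1 PySem.Dict.empty) e.2 else e.2)) r) (PySem.Dict.empty : PvNDict)) := by
  rw [pvFoldlFlatMap]
  apply PySem.List.foldl_congr_mem
  intro aa ce _
  rw [pvFoldlFlatMap]
  apply PySem.List.foldl_congr_mem
  intro aa re _
  rw [pvFoldlFlatMap]
  apply PySem.List.foldl_congr_mem
  intro aa de _
  rw [List.foldl_map]
  apply PySem.List.foldl_congr_mem
  intro aa mu _
  rw [pvStepB_eq]
  exact pvStepA_eq aa mu re.1 de.1 de.2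

-- the two ports agree for every input
theorem pv_main (cov_prevalence : List (String × List (String × List (String × Int)))) :
    aa_prevalence_extra cov_prevalence = aa_prevalence_extra_alt cov_prevalence := by
  show (cov_prevalence.foldl (fun aa cov_entry =>
      cov_entry.2.foldl (fun aa region_entry =>
        region_entry.2.foldl (fun aa date_entry =>
          ((PySem.Str.split? cov_entry.1 ",").getD []).foldl (fun aa mu =>
            match aa.get? mu with
            | some dm =>
              if dm.size ≠ 0 then
                match dm.get? region_entry.1 with
                | some dr =>
                  if dr.size ≠ 0 then
                    match dr.get? date_entry.1 with
                    | some w =>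
                      if w ≠ 0 then
                        aa.insert mu (dm.insert region_entry.1 (dr.insert date_entry.1 (w + date_entry.2)))
                      else
                        aa.insert mu (dm.insert region_entry.1 (dr.insert date_entry.1 date_entry.2))
                    | none => aa.insert mu (dm.insert region_entry.1 (dr.insert date_entry.1 date_entry.2))
                  else aa.insert mu (dm.insert region_entry.1 ((PySem.Dict.empty).insert date_entry.1 date_entry.2))
                | none => aa.insert mu (dm.insert region_entry.1 ((PySem.Dict.empty).insert date_entry.1 date_entry.2))
              else aa.insert mu ((PySem.Dict.empty).insert region_entry.1 ((PySem.Dict.empty).insert date_entry.1 date_entry.2))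
            | none => aa.insert mu ((PySem.Dict.empty).insert region_entry.1 ((PySem.Dict.empty).insert date_entry.1 date_entry.2))
          ) aa) aa) aa) (PySem.Dict.empty : PvNDict)).items.map (fun p => (p.1, p.2.items.map (fun q => (q.1, q.2.items))))
      = ((cov_prevalence.flatMap (fun cov_entry =>
      cov_entry.2.flatMap (fun region_entry =>
        region_entry.2.flatMap (fun date_entry =>
          ((PySem.Str.split? cov_entry.1 ",").getD []).map (fun mu =>
            PySem.Dict.mk [(mu, PySem.Dict.mk [(region_entry.1, PySem.Dict.mk [(date_entry.1, date_entry.2)])])]))))).foldl (fun r c =>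
      c.items.foldl (fun out e =>
        out.insert e.1 (if out.contains e.1 then pvMergeRegions (out.getD e.1 PySem.Dict.empty) e.2 else e.2)) r) (PySem.Dict.empty : PvNDict)).items.map (fun p => (p.1, p.2.items.map (fun q => (q.1, q.2.items))))
  rw [pv_dict_eq]

-- ===== VERDICT (by name: the statement is the Claim_ definition above) =====
theorem aa_prevalence_extra_spec : Claim_equal_aa_prevalence_extra := by
  intro cov_prevalence _
  exact pv_main cov_prevalence
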